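-- pv_equiv track=rewrite | github.com/blanketspy99/test_gitrepo | code/show_prediction_for_whole_videos.py | labelIndList2FrameInd
-- ===== SOURCE A (Python) =====
-- def labelIndList2FrameInd(labelList,reverLabDict):
--
--     currLabel = labelList[0]
--     phases = []
--     currStartFrame = 0
--     for i in range(len(labelList)):
--
--         if labelList[i] != currLabel:
--             phases.append((reverLabDict[currLabel],currStartFrame,i-1))
--             currStartFrame = i
--             currLabel = labelList[i]
--
--     phases.append((reverLabDict[currLabel],currStartFrame,i))
--     return phases
-- ===== SOURCE B (Python) =====
-- def labelIndList2FrameInd(labelList, reverLabDict):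
--     n = len(labelList)
--     bounds = [0] + [i for i in range(1, n) if labelList[i] != labelList[i - 1]] + [n]
--     return [(reverLabDict[labelList[s]], s, e - 1)
--             for s, e in zip(bounds, bounds[1:])]
-- ===== Notes on version B (the rewrite author's own statement) =====
-- stated objective: alternative
-- what changed: B first builds an explicit list of run-boundary indices (comparing each element only with its predecessor) and then emits one (label,start,end) triple per consecutive boundary pair, instead of A's single pass carrying a current-label/current-start accumulator that appends on each change.
import Mathlib
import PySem

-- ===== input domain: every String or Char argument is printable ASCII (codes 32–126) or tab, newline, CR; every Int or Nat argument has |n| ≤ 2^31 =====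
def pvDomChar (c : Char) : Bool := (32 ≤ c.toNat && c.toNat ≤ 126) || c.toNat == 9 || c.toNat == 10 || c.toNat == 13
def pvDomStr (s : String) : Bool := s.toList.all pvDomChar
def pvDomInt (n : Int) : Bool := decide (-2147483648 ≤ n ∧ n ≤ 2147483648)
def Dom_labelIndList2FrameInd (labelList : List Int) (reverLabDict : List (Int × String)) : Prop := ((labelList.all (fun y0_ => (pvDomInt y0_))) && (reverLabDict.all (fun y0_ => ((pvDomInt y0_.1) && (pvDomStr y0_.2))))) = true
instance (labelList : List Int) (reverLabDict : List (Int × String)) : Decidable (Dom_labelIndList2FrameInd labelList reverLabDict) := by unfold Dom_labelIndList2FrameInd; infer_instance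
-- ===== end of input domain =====

-- B groups consecutive equal labels via an explicit boundary-index table (two passes)
-- instead of A's single accumulator pass; same O(n) cost, different decomposition.

-- shared helper: Python's `reverLabDict[k]` — first matching key (KeyError excluded by Pre_, so the "" default is unreachable there)
def pvLook (d : List (Int × String)) (k : Int) : String :=
  ((d.find? (fun p => p.1 == k)).map Prod.snd).getD ""

-- ===== PORT A =====
-- transliteration of A: one pass over range(len(labelList)) carrying (currLabel, phases, currStartFrame)
def labelIndList2FrameInd (labelList : List Int) (reverLabDict : List (Int × String)) : List (String × Int × Int) :=
  match labelList with
  | [] => []   -- Python: labelList[0] raises IndexError; excluded by Pre_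
  | c0 :: _ =>
    let st := (List.range labelList.length).foldl
      (fun (s : Int × List (String × Int × Int) × Int) i =>
        if labelList.getD i 0 ≠ s.1 then
          (labelList.getD i 0, s.2.1 ++ [(pvLook reverLabDict s.1, s.2.2, (i : Int) - 1)], (i : Int))
        else s)
      (c0, [], 0)
    st.2.1 ++ [(pvLook reverLabDict st.1, st.2.2, (labelList.length : Int) - 1)]

-- ===== PORT B =====
-- transliteration of B: bounds = [0] + [i in 1..n-1 | l[i] ≠ l[i-1]] + [n]; emit one triple per consecutive pair
def labelIndList2FrameInd_alt (labelList : List Int) (reverLabDict : List (Int × String)) : List (String × Int × Int) :=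
  let n := labelList.length
  let bounds : List Nat :=
    0 :: ((List.range' 1 (n - 1)).filter (fun i => labelList.getD i 0 != labelList.getD (i - 1) 0)) ++ [n]
  (bounds.zip bounds.tail).map
    (fun p => (pvLook reverLabDict (labelList.getD p.1 0), (p.1 : Int), (p.2 : Int) - 1))

-- ===== PRECONDITION & SPEC =====
-- Pre_ excludes exactly where Python A raises: empty labelList (IndexError) and labels missing from reverLabDict (KeyError).
def Pre_labelIndList2FrameInd (labelList : List Int) (reverLabDict : List (Int × String)) : Prop :=
  labelList ≠ [] ∧ ∀ x ∈ labelList, (reverLabDict.find? (fun p => p.1 == x)).isSome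
instance (labelList : List Int) (reverLabDict : List (Int × String)) : Decidable (Pre_labelIndList2FrameInd labelList reverLabDict) := by unfold Pre_labelIndList2FrameInd; infer_instance
def pvWitness_labelIndList2FrameInd : List Int × (List (Int × String)) := ([1, 1, 2], [(1, "a"), (2, "b")])

def Spec_labelIndList2FrameInd (labelList : List Int) (reverLabDict : List (Int × String)) (out : List (String × Int × Int)) : Prop := out = labelIndList2FrameInd_alt labelList reverLabDict
instance (labelList : List Int) (reverLabDict : List (Int × String)) (out : List (String × Int × Int)) : Decidable (Spec_labelIndList2FrameInd labelList reverLabDict out) := by unfold Spec_labelIndList2FrameInd; infer_instance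

-- ===== CLAIM (what is proved, stated in full; the proofs are below) =====
def Claim_equal_labelIndList2FrameInd : Prop := ∀ (labelList : List Int) (reverLabDict : List (Int × String)), Dom_labelIndList2FrameInd labelList reverLabDict → Pre_labelIndList2FrameInd labelList reverLabDict → Spec_labelIndList2FrameInd labelList reverLabDict (labelIndList2FrameInd labelList reverLabDict)

-- ===== LEMMAS AND PROOFS =====

-- boundary predicate shared by the two analyses
def pvIsB (l : List Int) (i : Nat) : Bool := decide (0 < i) && (l.getD i 0 != l.getD (i - 1) 0)

-- the triple emitted for a completed run [s, e)
def pvEmit (l : List Int) (d : List (Int × String)) (p : Nat × Nat) : String × Int × Int :=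
  (pvLook d (l.getD p.1 0), (p.1 : Int), (p.2 : Int) - 1)

theorem pv_zip_tail_append {α : Type} (xs : List α) (y dflt : α) (h : xs ≠ []) :
    (xs ++ [y]).zip (xs ++ [y]).tail = xs.zip xs.tail ++ [(xs.getLastD dflt, y)] := by
  induction xs with
  | nil => exact absurd rfl h
  | cons a t ih =>
    cases t with
    | nil => simp [List.zip]
    | cons b t' =>
      have := ih (by simp)
      simp only [List.cons_append, List.zip_cons_cons, List.tail_cons] at this ⊢
      simp [this, List.getLastD]

-- A's fold state after processing range k, expressed via the boundary table up to k
theorem pv_inv (l : List Int) (d : List (Int × String)) (c0 : Int) (rest : List Int)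
    (hl : l = c0 :: rest) :
    ∀ k, 1 ≤ k → k ≤ l.length →
      (let bs := 0 :: (List.range k).filter (pvIsB l)
       (List.range k).foldl
        (fun (s : Int × List (String × Int × Int) × Int) i =>
          if l.getD i 0 ≠ s.1 then
            (l.getD i 0, s.2.1 ++ [(pvLook d s.1, s.2.2, (i : Int) - 1)], (i : Int))
          else s)
        (c0, [], 0)
        = (l.getD (bs.getLastD 0) 0, (bs.zip bs.tail).map (pvEmit l d), ((bs.getLastD 0 : Nat) : Int)))
      ∧ l.getD (k - 1) 0 = l.getD ((0 :: (List.range k).filter (pvIsB l)).getLastD 0) 0 := by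
  intro k
  induction k with
  | zero => intro h; omega
  | succ k ih =>
    intro _ hk1
    by_cases hk : 1 ≤ k
    · have ⟨ih1, ih2⟩ := ih hk (by omega)
      simp only at ih1
      have hrange : List.range (k + 1) = List.range k ++ [k] := List.range_succ
      have hfilter : (List.range (k + 1)).filter (pvIsB l)
          = (List.range k).filter (pvIsB l) ++ if pvIsB l k then [k] else [] := by
        rw [hrange, List.filter_append]
        congr 1
        cases h : pvIsB l k <;> simp [h]
      by_cases hb : pvIsB l k = true
      · -- boundary at k: condition fires
        have hne : l.getD k 0 ≠ l.getD (k - 1) 0 := by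
          simp only [pvIsB, Bool.and_eq_true, bne_iff_ne, decide_eq_true_eq] at hb
          exact hb.2
        set bs := 0 :: (List.range k).filter (pvIsB l) with hbs
        have hbsne : bs ≠ [] := by simp [hbs]
        have hbs' : (0 :: ((List.range k).filter (pvIsB l) ++ [k])) = bs ++ [k] := by
          simp [hbs]
        have hf2 : (List.range k ++ [k]).filter (pvIsB l)
            = (List.range k).filter (pvIsB l) ++ [k] := by
          rw [List.filter_append]; simp [hb]
        constructor
        · simp only [hrange, List.foldl_append, ih1, List.foldl_cons, List.foldl_nil]
          rw [if_pos (by rw [← ih2]; exact hne)]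
          simp only [hf2, hbs']
          rw [pv_zip_tail_append bs k 0 hbsne]
          simp [pvEmit]
        · simp only [hfilter, if_pos hb, hbs']
          simp
      · -- no boundary at k: l[k] = l[k-1], state unchanged
        have heq : l.getD k 0 = l.getD (k - 1) 0 := by
          simp only [pvIsB, Bool.and_eq_true, bne_iff_ne, decide_eq_true_eq] at hb
          by_cases h0 : 0 < k
          · by_contra hne; exact hb ⟨h0, hne⟩
          · omega
        constructor
        · simp only [hrange, List.foldl_append, ih1, List.foldl_cons, List.foldl_nil]
          rw [if_neg (by rw [← ih2, heq]; simp)]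
          simp [hb]
        · simp only [hfilter, hb, Bool.false_eq_true, ite_false, List.append_nil,
            Nat.add_sub_cancel]
          rw [heq]; exact ih2
    · -- k = 0, so k+1 = 1 : base case
      have hk0 : k = 0 := by omega
      subst hk0
      subst hl
      have h0 : pvIsB (c0 :: rest) 0 = false := by simp [pvIsB]
      constructor
      · simp [List.range_succ, List.filter, h0]
      · simp [List.filter, h0]

-- B's bounds list, rewritten through range/filter
theorem pv_bounds_eq (l : List Int) (hl : l ≠ []) :
    (0 :: ((List.range' 1 (l.length - 1)).filter (fun i => l.getD i 0 != l.getD (i - 1) 0)) : List Nat)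
      = 0 :: (List.range l.length).filter (pvIsB l) := by
  have hn : l.length = (l.length - 1) + 1 := by
    cases l with
    | nil => exact absurd rfl hl
    | cons a t => simp
  have hr : List.range l.length = 0 :: List.range' 1 (l.length - 1) := by
    rw [List.range_eq_range', hn, List.range'_succ]
    norm_num
  rw [hr]
  simp only [List.filter]
  have h0 : pvIsB l 0 = false := by simp [pvIsB]
  rw [h0]
  congr 1
  apply List.filter_congr
  intro i hi
  have : 0 < i := by
    have := List.mem_range'.mp hi; omega
  simp [pvIsB, this]

-- ===== VERDICT (by name: the statement is the Claim_ definition above) =====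
theorem labelIndList2FrameInd_spec : Claim_equal_labelIndList2FrameInd := by
  intro l d _ hpre
  obtain ⟨hne, _⟩ := hpre
  obtain ⟨c0, rest, hl⟩ : ∃ c0 rest, l = c0 :: rest := by
    cases l with
    | nil => exact absurd rfl hne
    | cons a t => exact ⟨a, t, rfl⟩
  unfold Spec_labelIndList2FrameInd labelIndList2FrameInd labelIndList2FrameInd_alt
  have hlen : 1 ≤ l.length := by rw [hl]; simp
  have ⟨h1, _⟩ := pv_inv l d c0 rest hl l.length hlen le_rfl
  simp only at h1
  rw [hl]
  simp only [← hl]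
  rw [h1, pv_bounds_eq l hne]
  set bs := 0 :: (List.range l.length).filter (pvIsB l) with hbs
  have hbsne : bs ≠ [] := by simp [hbs]
  have hz := pv_zip_tail_append bs l.length (0 : Nat) hbsne
  rw [hz, List.map_append]
  simp [pvEmit]
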